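-- pv_equiv track=rewrite | github.com/TStesh/MiniGames | Bubbles/bubbles.py | find_all_substrings
-- ===== SOURCE A (Python) =====
-- def find_all_substrings(src_str):
--     res = {}
--     for c in set(src_str):
--         if c == '-':
--             continue
--         z = [x for x in enumerate(src_str) if x[1] == c]
--         s = []
--         trigger = True
--         for i in range(z[0][0], z[-1][0] + 1):
--             if (i, c) in z:
--                 if trigger:
--                     s.append(i)
--                     s.append(i)
--                     trigger = False
--                 s.pop()
--                 s.append(i)
--             else:
--                 trigger = True
--         norm_s = []
--         for i in range(0, len(s), 2):
--             norm_s.append((s[i], s[i + 1]))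
--         res[c] = norm_s
--     return res
-- ===== SOURCE B (Python) =====
-- def find_all_substrings(src_str):
--     # Single pass: group consecutive identical characters into runs, then
--     # collect the (start, end) interval of each run under its character.
--     runs = []
--     i, n = 0, len(src_str)
--     while i < n:
--         j = i + 1
--         while j < n and src_str[j] == src_str[i]:
--             j += 1
--         runs.append((src_str[i], i, j - 1))
--         i = j
--     items = [(c, (a, b)) for c, a, b in runs if c != '-']
--     res = {}
--     for c, iv in items:
--         res.setdefault(c, []).append(iv)
--     return res
-- ===== Notes on version B (the rewrite author's own statement) =====
-- stated objective: faster
-- what changed: A scans the whole index range between first and last occurrence for every distinct character (membership tests in a list of pairs); B makes one pass grouping consecutive identical characters into runs and files each run's interval under its character.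
import Mathlib
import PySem

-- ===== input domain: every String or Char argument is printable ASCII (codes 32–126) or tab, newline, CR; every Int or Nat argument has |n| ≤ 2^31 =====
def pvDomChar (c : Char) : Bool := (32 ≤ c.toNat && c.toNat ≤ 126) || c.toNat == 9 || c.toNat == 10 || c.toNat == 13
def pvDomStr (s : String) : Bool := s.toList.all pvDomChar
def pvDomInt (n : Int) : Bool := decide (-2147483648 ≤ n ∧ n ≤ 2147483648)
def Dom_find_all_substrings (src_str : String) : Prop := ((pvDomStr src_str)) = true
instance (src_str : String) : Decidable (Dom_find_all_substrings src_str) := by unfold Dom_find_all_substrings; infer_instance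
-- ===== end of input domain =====

-- B replaces A's per-distinct-character scan of the whole index range (with list membership
-- tests) by one left-to-right pass grouping consecutive identical characters into runs.
-- Python's set(src_str) iteration order is unspecified; both ports use first-occurrence
-- order (dict outputs are compared ignoring order).

-- ===== PORT A =====
-- pvStep is the body of A's inner `for i in range(z[0][0], z[-1][0] + 1)` loop over the
-- state (s, trigger); `s.pop()` only ever runs right after at least one append (the trigger
-- logic guarantees s nonempty), so it is dropLast. pvLoopRun is that loop, pvPairUp is the
-- `for i in range(0, len(s), 2)` pairing loop. z[0] / z[-1] are taken on the match-checked
-- nonempty z (c is drawn from set(src_str), so z is never empty and Python never raises).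


def pvStep (P : Int → Bool) (st : List Int × Bool) (i : Int) : List Int × Bool :=
  if P i then
    ((if st.2 then st.1 ++ [i, i] else st.1).dropLast ++ [i], false)
  else (st.1, true)

def pvLoopRun (z : List (Int × Char)) (c : Char) (a b : Int) : List Int × Bool :=
  (PySem.List.pyRange a (b + 1) 1).foldl (pvStep (fun i => z.contains (i, c))) ([], true)

def pvPairUp (s : List Int) : List (Int × Int) :=
  (PySem.List.pyRange 0 s.length 2).map
    (fun i => (PySem.List.pyGetD s i 0, PySem.List.pyGetD s (i + 1) 0))

def pvInnerA (l : List Char) (c : Char) : List (Int × Int) :=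
  match (PySem.List.enumerate l).filter (fun x => x.2 == c) with
  | [] => []
  | p :: rest =>
    pvPairUp (pvLoopRun (p :: rest) c p.1 ((p :: rest).getLast (by simp)).1).1

def find_all_substrings (src_str : String) : List (String × List (Int × Int)) :=
  ((PySem.Set.ofList src_str.toList).foldl
    (fun res c => if c = '-' then res
      else res.insert (String.ofList [c]) (pvInnerA src_str.toList c))
    PySem.Dict.empty).items

-- ===== PORT B =====
-- One pass: maximal runs of identical characters, each as (char, start, end);
-- non-'-' runs are filed under their character in insertion order.

def pvRuns : List Char → Int → List (Char × Int × Int)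
  | [], _ => []
  | c :: rest, i =>
    let m := (rest.takeWhile (fun x => x == c)).length
    (c, i, i + (m : Int)) :: pvRuns (rest.drop m) (i + (m : Int) + 1)
termination_by l => l.length
decreasing_by
  simp only [List.length_cons, List.length_drop]
  omega

def find_all_substrings_alt (src_str : String) : List (String × List (Int × Int)) :=
  (((pvRuns src_str.toList 0).filterMap
      (fun r => if r.1 = '-' then none else some (String.ofList [r.1], r.2))).foldl
    (fun d p => d.modify p.1 [] (· ++ [p.2])) PySem.Dict.empty).items

-- ===== PRECONDITION & SPEC =====
def Spec_find_all_substrings (src_str : String) (out : List (String × List (Int × Int))) : Prop := out = find_all_substrings_alt src_str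
instance (src_str : String) (out : List (String × List (Int × Int))) : Decidable (Spec_find_all_substrings src_str out) := by unfold Spec_find_all_substrings; infer_instance

-- ===== CLAIM (what is proved, stated in full; the proofs are below) =====
def Claim_equal_find_all_substrings : Prop := ∀ (src_str : String), Dom_find_all_substrings src_str → Spec_find_all_substrings src_str (find_all_substrings src_str)

-- ===== LEMMAS AND PROOFS =====

def pvOcc (c : Char) (l : List Char) (i : Int) : List Int :=
  ((PySem.List.enumerate l i).filter (fun x => x.2 == c)).map (·.1)

def pvBlocksGo (a b : Int) : List Int → List (Int × Int)
  | [] => [(a, b)]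
  | x :: xs => if x = b + 1 then pvBlocksGo a x xs else (a, b) :: pvBlocksGo x x xs

def pvBlocks : List Int → List (Int × Int)
  | [] => []
  | x :: xs => pvBlocksGo x x xs

theorem mem_pvOcc {c : Char} {t : List Char} {j y : Int} :
    y ∈ pvOcc c t j ↔ ∃ (k : Nat) (h : k < t.length), y = j + k ∧ t[k] = c := by
  simp only [pvOcc, List.mem_map, List.mem_filter, PySem.List.mem_enumerate_iff]
  constructor
  · rintro ⟨⟨p1, p2⟩, ⟨⟨k, hk, hp⟩, hc⟩, rfl⟩
    cases hp
    exact ⟨k, hk, rfl, by simpa using hc⟩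
  · rintro ⟨k, hk, rfl, hc⟩
    exact ⟨(j + k, t[k]), ⟨⟨k, hk, rfl⟩, by simpa using hc⟩, rfl⟩

theorem pvOcc_append (c : Char) (u v : List Char) (i : Int) :
    pvOcc c (u ++ v) i = pvOcc c u i ++ pvOcc c v (i + u.length) := by
  simp [pvOcc, PySem.List.enumerate_append]

theorem pvOcc_all_eq {c : Char} {u : List Char} (i : Int) (h : ∀ x ∈ u, x = c) :
    pvOcc c u i = PySem.List.pyRange i (i + u.length) 1 := by
  unfold pvOcc
  rw [List.filter_eq_self.2, PySem.List.map_fst_enumerate]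
  intro p hp
  rw [PySem.List.mem_enumerate_iff] at hp
  obtain ⟨k, hk, rfl⟩ := hp
  simpa using h _ (List.getElem_mem hk)

theorem pvOcc_all_ne {c : Char} {u : List Char} (i : Int) (h : ∀ x ∈ u, x ≠ c) :
    pvOcc c u i = [] := by
  unfold pvOcc
  rw [List.filter_eq_nil_iff.2, List.map_nil]
  intro p hp
  rw [PySem.List.mem_enumerate_iff] at hp
  obtain ⟨k, hk, rfl⟩ := hp
  simpa using h _ (List.getElem_mem hk)

theorem pvBlocksGo_range (k : Nat) : ∀ (a b : Int) (t : List Int),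
    pvBlocksGo a b (PySem.List.pyRange (b + 1) (b + 1 + k) 1 ++ t) = pvBlocksGo a (b + k) t := by
  induction k with
  | zero => intro a b t; simp [PySem.List.pyRange_one_eq_nil]
  | succ n ih =>
    intro a b t
    rw [PySem.List.pyRange_one_cons (by omega)]
    simp only [List.cons_append, pvBlocksGo]
    rw [show (b + 1 + ((n : Nat) + 1 : Nat) : Int) = b + 1 + 1 + (n : Nat) by push_cast; ring,
        show (b + ((n : Nat) + 1 : Nat) : Int) = b + 1 + (n : Nat) by push_cast; ring]
    exact ih a (b + 1) t

theorem pvBlocksGo_stop (a b : Int) (t : List Int) (h : ∀ y ∈ t, b + 1 < y) :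
    pvBlocksGo a b t = (a, b) :: pvBlocks t := by
  cases t with
  | nil => simp [pvBlocksGo, pvBlocks]
  | cons x xs =>
    have : x ≠ b + 1 := by have := h x (by simp); omega
    simp [pvBlocksGo, pvBlocks, this]

theorem pvBlocks_block_prepend (a : Int) (m : Nat) (t : List Int)
    (h : ∀ y ∈ t, a + m + 1 < y) :
    pvBlocks (PySem.List.pyRange a (a + m + 1) 1 ++ t) = (a, a + m) :: pvBlocks t := by
  rw [PySem.List.pyRange_one_cons (by omega)]
  simp only [List.cons_append, pvBlocks]
  rw [show a + (m : Int) + 1 = a + 1 + (m : Nat) by push_cast; ring, pvBlocksGo_range m a a t]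
  exact pvBlocksGo_stop a (a + m) t (by intro y hy; have := h y hy; omega)

theorem runs_filter_eq_blocks_aux (c : Char) :
    ∀ (n : Nat) (l : List Char), l.length ≤ n → ∀ (i : Int),
    (pvRuns l i).filterMap (fun r => if r.1 = c then some r.2 else none)
      = pvBlocks (pvOcc c l i) := by
  intro n
  induction n with
  | zero =>
    intro l hl i
    rw [List.length_eq_zero_iff.1 (Nat.le_zero.1 hl)]
    simp [pvRuns, pvOcc, PySem.List.enumerate, pvBlocks]
  | succ n ih =>
    intro l hl i
    match l with
    | [] => simp [pvRuns, pvOcc, PySem.List.enumerate, pvBlocks]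
    | c0 :: rest =>
      have hsplit : rest = rest.takeWhile (fun x => x == c0) ++ rest.dropWhile (fun x => x == c0) :=
        (List.takeWhile_append_dropWhile).symm
      set tw := rest.takeWhile (fun x => x == c0) with htw
      set dr := rest.dropWhile (fun x => x == c0) with hdr
      have hdrop : rest.drop tw.length = dr := by
        conv_lhs => rw [hsplit]
        exact List.drop_left
      have hdrlen : dr.length ≤ n := by
        have : tw.length + dr.length = rest.length := by
          conv_rhs => rw [hsplit]; simp
        simp only [List.length_cons] at hl
        omega
      have hl2 : (c0 :: rest : List Char) = (c0 :: tw) ++ dr := by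
        rw [List.cons_append, ← hsplit]
      rw [pvRuns, hdrop]
      have hocc : pvOcc c (c0 :: rest) i
          = pvOcc c (c0 :: tw) i ++ pvOcc c dr (i + (tw.length + 1 : Nat)) := by
        conv_lhs => rw [hl2]
        rw [pvOcc_append]
        simp
      by_cases hc : c0 = c
      · subst hc
        have hall : ∀ x ∈ (c0 :: tw), x = c0 := by
          intro x hx
          rcases List.mem_cons.1 hx with h | h
          · exact h
          · simpa using List.mem_takeWhile_imp h
        have hdrhead : ∀ y ∈ pvOcc c0 dr (i + (tw.length + 1 : Nat)), i + tw.length + 1 < y := by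
          intro y hy
          obtain ⟨k, hk, rfl, hget⟩ := mem_pvOcc.1 hy
          have hkpos : k ≠ 0 := by
            intro h0
            subst h0
            have hne : dr ≠ [] := by intro h; rw [h] at hk; simp at hk
            have hh : ¬ ((dr.head hne) == c0) = true := by
              have := List.head_dropWhile_not (p := fun x => x == c0) (l := rest)
                (by rw [← hdr]; exact hne)
              simpa [← hdr] using this
            rw [List.getElem_zero_eq_head hk] at hget
            simp [hget] at hh
          push_cast
          omega
        rw [hocc, pvOcc_all_eq i hall]
        simp only [List.length_cons]
        rw [show (i + (tw.length + 1 : Nat) : Int) = i + tw.length + 1 by push_cast; ring]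
        rw [pvBlocks_block_prepend i tw.length _ (by intro y hy; exact hdrhead y (by
          rw [show (i + (tw.length + 1 : Nat) : Int) = i + tw.length + 1 by push_cast; ring]; exact hy))]
        rw [List.filterMap_cons]
        rw [ih dr hdrlen (i + tw.length + 1)]
        simp only [reduceIte]
        rfl
      · have hall : ∀ x ∈ (c0 :: tw), x ≠ c := by
          intro x hx
          rcases List.mem_cons.1 hx with h | h
          · subst h; exact hc
          · have := List.mem_takeWhile_imp h
            simp only [beq_iff_eq] at this
            subst this; exact hc
        rw [hocc, pvOcc_all_ne i hall, List.nil_append, List.filterMap_cons]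
        simp only [if_neg hc]
        rw [ih dr hdrlen _]
        rw [show (i + (tw.length + 1 : Nat) : Int) = i + tw.length + 1 by push_cast; ring]

theorem runs_filter_eq_blocks (l : List Char) (i : Int) (c : Char) :
    (pvRuns l i).filterMap (fun r => if r.1 = c then some r.2 else none)
      = pvBlocks (pvOcc c l i) := by
  exact runs_filter_eq_blocks_aux c l.length l (le_refl _) i

def pvFlat (ps : List (Int × Int)) : List Int := ps.flatMap (fun p => [p.1, p.2])

theorem pvStep_in_false (P : Int → Bool) (s : List Int) (y i : Int) (h : P i = true) :
    pvStep P (s ++ [y], false) i = (s ++ [i], false) := by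
  simp [pvStep, h]

theorem pvStep_in_true (P : Int → Bool) (s : List Int) (i : Int) (h : P i = true) :
    pvStep P (s, true) i = (s ++ [i, i], false) := by
  simp only [pvStep, h, if_pos]
  rw [show s ++ [i, i] = (s ++ [i]) ++ [i] by simp]
  rw [List.dropLast_concat]

theorem pvStep_out (P : Int → Bool) (st : List Int × Bool) (i : Int) (h : P i = false) :
    pvStep P st i = (st.1, true) := by
  simp [pvStep, h]

theorem loop_inblock_tail (P : Int → Bool) :
    ∀ (k : Nat) (a : Int) (s : List Int) (y : Int),
    (∀ i, a ≤ i → i < a + k → P i = true) →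
    (PySem.List.pyRange a (a + k) 1).foldl (pvStep P) (s ++ [y], false)
      = (s ++ [if k = 0 then y else a + k - 1], false) := by
  intro k
  induction k with
  | zero => intro a s y h; simp [PySem.List.pyRange_one_eq_nil]
  | succ n ih =>
    intro a s y h
    rw [PySem.List.pyRange_one_cons (by omega), List.foldl_cons,
      pvStep_in_false P s y a (h a (le_refl _) (by omega))]
    rw [show (a + ((n : Nat) + 1 : Nat) : Int) = a + 1 + (n : Nat) by push_cast; ring]
    rw [ih (a + 1) s a (by intro i h1 h2; exact h i (by omega) (by push_cast at h2 ⊢; omega))]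
    split_ifs with h1 h2 h3 <;> simp_all <;> omega

theorem loop_inblock (P : Int → Bool) (m : Nat) (a : Int) (s : List Int)
    (h : ∀ i, a ≤ i → i ≤ a + m → P i = true) :
    (PySem.List.pyRange a (a + m + 1) 1).foldl (pvStep P) (s, true)
      = (s ++ [a, a + m], false) := by
  rw [PySem.List.pyRange_one_cons (by omega), List.foldl_cons,
    pvStep_in_true P s a (h a (le_refl _) (by omega))]
  rw [show s ++ [a, a] = (s ++ [a]) ++ [a] by simp]
  rw [show (a + (m : Nat) + 1 : Int) = (a + 1) + (m : Nat) by ring]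
  rw [loop_inblock_tail P m (a + 1) (s ++ [a]) a
    (by intro i h1 h2; exact h i (by omega) (by omega))]
  split_ifs with h1 <;> simp_all <;> omega

theorem loop_gap (P : Int → Bool) :
    ∀ (k : Nat) (a : Int) (st : List Int × Bool),
    (∀ i, a ≤ i → i < a + k → P i = false) →
    (PySem.List.pyRange a (a + k) 1).foldl (pvStep P) st
      = (st.1, if k = 0 then st.2 else true) := by
  intro k
  induction k with
  | zero => intro a st h; simp [PySem.List.pyRange_one_eq_nil]
  | succ n ih =>
    intro a st h
    rw [PySem.List.pyRange_one_cons (by omega), List.foldl_cons,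
      pvStep_out P st a (h a (le_refl _) (by omega))]
    rw [show (a + ((n : Nat) + 1 : Nat) : Int) = a + 1 + (n : Nat) by push_cast; ring]
    rw [ih (a + 1) (st.1, true) (by intro i h1 h2; exact h i (by omega) (by push_cast at h2 ⊢; omega))]
    simp

theorem pvSplit : ∀ (xs : List Int) (x : Int), (x :: xs).Pairwise (· < ·) →
    ∃ (k : Nat) (u' : List Int),
      x :: xs = PySem.List.pyRange x (x + k + 1) 1 ++ u' ∧ (∀ y ∈ u', x + k + 1 < y) ∧
      u'.Pairwise (· < ·) ∧
      pvBlocks (x :: xs) = (x, x + k) :: pvBlocks u' := by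
  intro xs
  induction xs with
  | nil =>
    intro x _
    exact ⟨0, [], by simp [PySem.List.pyRange_one_singleton], by simp, by simp,
      by simp [pvBlocks, pvBlocksGo]⟩
  | cons y ys ih =>
    intro x hp
    have hxy : x < y := (List.pairwise_cons.1 hp).1 y (by simp)
    have hpt : (y :: ys).Pairwise (· < ·) := (List.pairwise_cons.1 hp).2
    by_cases hy : y = x + 1
    · obtain ⟨k', u', hdec, hbd, hpu, _⟩ := ih y hpt
      have hd2 : x :: y :: ys
          = PySem.List.pyRange x (x + ((k' : Nat) + 1 : Nat) + 1) 1 ++ u' := by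
        rw [show (x + ((k' : Nat) + 1 : Nat) + 1 : Int) = x + 1 + ((k' : Nat) + 1) by push_cast; ring]
        rw [PySem.List.pyRange_one_cons (by omega), List.cons_append]
        rw [show (x + 1 + ((k' : Nat) + 1) : Int) = (x + 1) + (k' : Nat) + 1 by ring]
        rw [← hy, ← hdec]
      refine ⟨k' + 1, u', hd2, ?_, hpu, ?_⟩
      · intro z hz
        have := hbd z hz
        push_cast
        omega
      · rw [hd2, pvBlocks_block_prepend x (k' + 1) u'
          (by intro z hz; have := hbd z hz; push_cast; omega)]
    · refine ⟨0, y :: ys, by simp [PySem.List.pyRange_one_singleton], ?_, hpt, ?_⟩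
      · intro z hz
        rcases List.mem_cons.1 hz with rfl | hz
        · omega
        · have := (List.pairwise_cons.1 hpt).1 z hz
          push_cast
          omega
      · rw [show (x + ((0 : Nat) : Int) : Int) = x by push_cast; ring]
        exact pvBlocksGo_stop x x (y :: ys) (by
          intro z hz
          rcases List.mem_cons.1 hz with rfl | hz
          · omega
          · have := (List.pairwise_cons.1 hpt).1 z hz
            omega)

theorem pyRange_getLastD (a : Int) (k : Nat) :
    (PySem.List.pyRange a (a + k + 1) 1).getLastD 0 = a + k := by
  rw [show (a + (k : Nat) + 1 : Int) = (a + (k : Nat)) + 1 by ring,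
    PySem.List.pyRange_one_succ_right (by omega)]
  rw [List.getLastD_eq_getLast?, List.getLast?_append]
  simp

theorem getLastD_append_ne_nil {u v : List Int} (h : v ≠ []) (d : Int) :
    (u ++ v).getLastD d = v.getLastD d := by
  rw [List.getLastD_eq_getLast?, List.getLastD_eq_getLast?, List.getLast?_append]
  cases hv : v.getLast? with
  | none => exact absurd (List.getLast?_eq_none_iff.1 hv) h
  | some z => simp

theorem pvLoop (P : Int → Bool) : ∀ (n : Nat) (x : Int) (xs : List Int) (s : List Int),
    (x :: xs).length ≤ n →
    (x :: xs).Pairwise (· < ·) →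
    (∀ i, x ≤ i → P i = (x :: xs).contains i) →
    (PySem.List.pyRange x ((x :: xs).getLastD 0 + 1) 1).foldl (pvStep P) (s, true)
      = (s ++ pvFlat (pvBlocks (x :: xs)), false) := by
  intro n
  induction n with
  | zero => intro x xs s hl; simp at hl
  | succ n ih =>
    intro x xs s hl hp hP
    obtain ⟨k, u', hdec, hbd, hpu, hblocks⟩ := pvSplit xs x hp
    have hmemL : ∀ i : Int, x ≤ i → i ≤ x + k → P i = true := by
      intro i h1 h2
      rw [hP i h1, List.contains_eq_mem, decide_eq_true_iff, hdec, List.mem_append]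
      exact Or.inl (PySem.List.mem_pyRange_one.2 ⟨h1, by omega⟩)
    cases u' with
    | nil =>
      rw [List.append_nil] at hdec
      rw [hblocks, hdec, pyRange_getLastD]
      rw [loop_inblock P k x s (by intro i h1 h2; exact hmemL i h1 h2)]
      simp [pvFlat, pvBlocks]
    | cons a' t =>
      have ha' : x + k + 1 < a' := hbd a' (by simp)
      have hL : (x :: xs).getLastD 0 = (a' :: t).getLastD 0 := by
        rw [hdec]; exact getLastD_append_ne_nil (by simp) 0
      have hLmem : (a' :: t).getLastD 0 ∈ a' :: t := by
        rw [List.getLastD_eq_getLast?, List.getLast?_eq_some_getLast (l := a' :: t) (by simp)]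
        simp only [Option.getD_some]
        exact List.getLast_mem _
      have haL : a' ≤ (a' :: t).getLastD 0 := by
        rcases List.mem_cons.1 hLmem with h | h
        · omega
        · have := (List.pairwise_cons.1 hpu).1 _ h
          omega
      set L := (a' :: t).getLastD 0 with hLdef
      rw [hL]
      rw [PySem.List.pyRange_one_append x (x + k + 1) (L + 1) (by omega) (by omega),
        PySem.List.pyRange_one_append (x + k + 1) a' (L + 1) (by omega) (by omega),
        List.foldl_append, List.foldl_append,
        loop_inblock P k x s (by intro i h1 h2; exact hmemL i h1 h2)]
      have hgap : PySem.List.pyRange (x + k + 1) a' 1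
          = PySem.List.pyRange (x + k + 1) ((x + k + 1) + (a' - (x + k + 1)).toNat) 1 := by
        congr 1
        omega
      rw [hgap, loop_gap P _ _ _ (by
        intro i h1 h2
        rw [hP i (by omega), List.contains_eq_mem, decide_eq_false_iff_not, hdec, List.mem_append]
        rw [Int.toNat_of_nonneg (by omega)] at h2
        rintro (h | h)
        · rw [PySem.List.mem_pyRange_one] at h
          omega
        · rcases List.mem_cons.1 h with rfl | h
          · omega
          · have := (List.pairwise_cons.1 hpu).1 _ h
            omega)]
      have hgk : ((a' - (x + k + 1)).toNat ≠ 0) := by omega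
      simp only [if_neg hgk]
      have hlen : (a' :: t).length ≤ n := by
        have := congrArg List.length hdec
        simp [PySem.List.length_pyRange_one] at this ⊢
        simp at hl
        omega
      have hP' : ∀ i, a' ≤ i → P i = (a' :: t).contains i := by
        intro i h1
        rw [hP i (by omega), hdec, List.contains_append]
        have : (PySem.List.pyRange x (x + k + 1) 1).contains i = false := by
          rw [List.contains_eq_mem, decide_eq_false_iff_not, PySem.List.mem_pyRange_one]
          omega
        rw [this, Bool.false_or]
      rw [ih a' t (s ++ [x, x + k]) hlen hpu hP']
      rw [hblocks]
      simp [pvFlat]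

theorem length_pvFlat (ps : List (Int × Int)) : (pvFlat ps).length = 2 * ps.length := by
  induction ps with
  | nil => simp [pvFlat]
  | cons p ps ih => simp [pvFlat] at ih ⊢; omega

theorem flat_getD (ps : List (Int × Int)) : ∀ (k : Nat), k < ps.length →
    (pvFlat ps).getD (2 * k) 0 = (ps.getD k (0, 0)).1
      ∧ (pvFlat ps).getD (2 * k + 1) 0 = (ps.getD k (0, 0)).2 := by
  induction ps with
  | nil => intro k hk; simp at hk
  | cons p ps ih =>
    intro k hk
    match k with
    | 0 => simp [pvFlat]
    | Nat.succ m =>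
      have h3 : 2 * (m + 1) + 1 = (2 * m + 1) + 1 + 1 := by ring
      have h2 : 2 * (m + 1) = (2 * m) + 1 + 1 := by ring
      rw [h3, h2]
      have : pvFlat (p :: ps) = p.1 :: p.2 :: pvFlat ps := by simp [pvFlat]
      rw [this]
      simp only [List.getD_cons_succ]
      exact ih m (by simpa using hk)

theorem pair_pvFlat (ps : List (Int × Int)) :
    pvPairUp (pvFlat ps) = ps := by
  unfold pvPairUp
  rw [length_pvFlat, PySem.List.pyRange_of_pos _ _ (by omega : (0:Int) < 2)]
  cases hn : ps.length with
  | zero =>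
    have : ps = [] := List.length_eq_zero_iff.1 hn
    subst this
    simp
  | succ m =>
    rw [if_pos (by push_cast; omega)]
    have hq : (((2 * ((m : Int) + 1) - 0 + 2 - 1) / 2)).toNat = m + 1 := by omega
    rw [show (((2 * (m + 1) : Nat) : Int) - 0 + 2 - 1) = (2 * ((m : Int) + 1) - 0 + 2 - 1) by push_cast; ring]
    rw [hq, List.map_map]
    apply List.ext_getElem (by simp [hn])
    intro k h1 h2
    simp only [List.getElem_map, List.getElem_range, Function.comp_apply]
    have hk : k < ps.length := by simpa [hn] using h2
    obtain ⟨e1, e2⟩ := flat_getD ps k hk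
    have c1 : (0 + 2 * (k : Int)) = ((2 * k : Nat) : Int) := by push_cast; ring
    have c2 : (0 + 2 * (k : Int) + 1) = ((2 * k + 1 : Nat) : Int) := by push_cast; ring
    rw [c1, show ((2 * k : Nat) : Int) + 1 = ((2 * k + 1 : Nat) : Int) by push_cast; ring,
      PySem.List.pyGetD_natCast, PySem.List.pyGetD_natCast, e1, e2,
      List.getD_eq_getElem ps (0, 0) hk]

theorem contains_z_eq (z : List (Int × Char)) (c : Char)
    (hz : ∀ q ∈ z, q.2 = c) (i : Int) :
    z.contains (i, c) = (z.map (·.1)).contains i := by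
  rw [List.contains_eq_mem, List.contains_eq_mem, decide_eq_decide]
  constructor
  · intro h; exact List.mem_map.2 ⟨(i, c), h, rfl⟩
  · intro h
    obtain ⟨q, hq, hq1⟩ := List.mem_map.1 h
    have := hz q hq
    have : q = (i, c) := Prod.ext hq1 this
    rwa [← this]

theorem innerA_eq_blocks (l : List Char) (c : Char) :
    pvInnerA l c = pvBlocks (pvOcc c l 0) := by
  have hzc : ∀ q ∈ (PySem.List.enumerate l).filter (fun x => x.2 == c), q.2 = c := by
    intro q hq
    have := (List.mem_filter.1 hq).2
    simpa using this
  have hpwz : ((PySem.List.enumerate l).filter (fun x => x.2 == c)).Pairwise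
      (fun q r : Int × Char => q.1 < r.1) :=
    (PySem.List.pairwise_lt_enumerate l 0).filter _
  rw [show pvOcc c l 0 = ((PySem.List.enumerate l).filter (fun x => x.2 == c)).map (·.1) from rfl]
  unfold pvInnerA
  generalize hzq : (PySem.List.enumerate l).filter (fun x => x.2 == c) = zz at hzc hpwz ⊢
  cases zz with
  | nil => simp [pvBlocks]
  | cons p rest =>
    show pvPairUp (pvLoopRun (p :: rest) c p.1 ((p :: rest).getLast (by simp)).1).1
        = pvBlocks ((p :: rest).map (·.1))
    have hpw : (p.1 :: rest.map (·.1)).Pairwise (· < ·) := by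
      have := List.pairwise_map (f := fun q : Int × Char => q.1)
        (R := fun a b : Int => a < b) (l := p :: rest)
      exact this.2 hpwz
    have hlastD : ((p :: rest).getLast (by simp)).1
        = (p.1 :: rest.map (·.1)).getLastD 0 := by
      rw [show p.1 :: rest.map (·.1) = (p :: rest).map (·.1) by simp]
      rw [List.getLastD_eq_getLast?, List.getLast?_map,
        List.getLast?_eq_some_getLast (l := p :: rest) (by simp)]
      simp
    have hPrel : ∀ i : Int, p.1 ≤ i →
        (fun i => (p :: rest).contains (i, c)) i = (p.1 :: rest.map (·.1)).contains i := by
      intro i _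
      have := contains_z_eq (p :: rest) c hzc i
      simpa using this
    have hloop : pvLoopRun (p :: rest) c p.1 ((p :: rest).getLast (by simp)).1
        = (pvFlat (pvBlocks (p.1 :: rest.map (·.1))), false) := by
      unfold pvLoopRun
      rw [hlastD]
      simpa using pvLoop (fun i => (p :: rest).contains (i, c))
        (p.1 :: rest.map (·.1)).length p.1 (rest.map (·.1)) [] (le_refl _) hpw hPrel
    rw [hloop]
    simp only [List.map_cons]
    exact pair_pvFlat _

theorem set_foldl_add_filter (p : Char → Bool) :
    ∀ (l : List Char) (s : PySem.Set Char),
      (l.filter p).foldl PySem.Set.add (s.filter p) = (l.foldl PySem.Set.add s).filter p := by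
  intro l
  induction l with
  | nil => intro s; simp
  | cons a l ih =>
    intro s
    by_cases hp : p a = true
    · rw [List.filter_cons_of_pos hp, List.foldl_cons, List.foldl_cons]
      have : PySem.Set.add (s.filter p) a = (PySem.Set.add s a).filter p := by
        show (if (s.filter p).contains a then s.filter p else s.filter p ++ [a])
          = (if PySem.Set.contains s a then s else s ++ [a]).filter p
        have hc : (s.filter p).contains a = PySem.Set.contains s a := by
          rw [List.contains_eq_mem, PySem.Set.contains_eq_decide, decide_eq_decide]
          simp [List.mem_filter, hp]
        rw [hc]
        by_cases hs : PySem.Set.contains s a = true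
        · rw [if_pos hs, if_pos hs]
        · rw [if_neg hs, if_neg hs, List.filter_append, List.filter_cons_of_pos hp]
          simp
      rw [this, ih]
    · rw [List.filter_cons_of_neg (by simpa using hp), List.foldl_cons]
      have : (PySem.Set.add s a).filter p = s.filter p := by
        show (if s.contains a then s else s ++ [a]).filter p = s.filter p
        by_cases hs : PySem.Set.contains s a = true
        · rw [if_pos hs]
        · rw [if_neg hs, List.filter_append, List.filter_cons_of_neg (by simpa using hp)]
          simp
      rw [← this]
      exact ih (PySem.Set.add s a)

theorem set_ofList_filter (p : Char → Bool) (l : List Char) :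
    PySem.Set.ofList (l.filter p) = (PySem.Set.ofList l).filter p := by
  have := set_foldl_add_filter p l []
  simpa [PySem.Set.ofList_eq_foldl] using this

theorem set_foldl_add_map (f : Char → String) (hf : Function.Injective f) :
    ∀ (l : List Char) (s : PySem.Set Char),
      (l.map f).foldl PySem.Set.add (s.map f) = (l.foldl PySem.Set.add s).map f := by
  intro l
  induction l with
  | nil => intro s; simp
  | cons a l ih =>
    intro s
    rw [List.map_cons, List.foldl_cons, List.foldl_cons]
    have : PySem.Set.add (s.map f) (f a) = (PySem.Set.add s a).map f := by
      show (if (s.map f).contains (f a) then s.map f else s.map f ++ [f a])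
        = (if PySem.Set.contains s a then s else s ++ [a]).map f
      have hc : (s.map f).contains (f a) = PySem.Set.contains s a := by
        rw [List.contains_eq_mem, PySem.Set.contains_eq_decide, decide_eq_decide]
        exact List.mem_map_of_injective hf
      rw [hc]
      by_cases hs : PySem.Set.contains s a = true
      · rw [if_pos hs, if_pos hs]
      · rw [if_neg hs, if_neg hs, List.map_append, List.map_singleton]
    rw [this, ih]

theorem set_ofList_map (f : Char → String) (hf : Function.Injective f) (l : List Char) :
    PySem.Set.ofList (l.map f) = (PySem.Set.ofList l).map f := by
  have := set_foldl_add_map f hf l []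
  simpa [PySem.Set.ofList_eq_foldl] using this

theorem set_update_contained : ∀ (t : List Char) (s : PySem.Set Char),
    (∀ x ∈ t, PySem.Set.contains s x = true) → t.foldl PySem.Set.add s = s := by
  intro t
  induction t with
  | nil => intro s _; simp
  | cons a t ih =>
    intro s h
    rw [List.foldl_cons]
    have ha : PySem.Set.add s a = s := by
      show (if PySem.Set.contains s a then s else s ++ [a]) = s
      rw [if_pos (h a (by simp))]
    rw [ha]
    exact ih s (fun x hx => h x (by simp [hx]))

theorem set_heads_aux : ∀ (n : Nat) (l : List Char), l.length ≤ n → ∀ (i : Int) (s : PySem.Set Char),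
    ((pvRuns l i).map (·.1)).foldl PySem.Set.add s = l.foldl PySem.Set.add s := by
  intro n
  induction n with
  | zero =>
    intro l hl i s
    rw [List.length_eq_zero_iff.1 (Nat.le_zero.1 hl)]
    simp [pvRuns]
  | succ n ih =>
    intro l hl i s
    match l with
    | [] => simp [pvRuns]
    | c0 :: rest =>
      have hsplit : rest = rest.takeWhile (fun x => x == c0) ++ rest.dropWhile (fun x => x == c0) :=
        (List.takeWhile_append_dropWhile).symm
      set tw := rest.takeWhile (fun x => x == c0) with htw
      set dr := rest.dropWhile (fun x => x == c0) with hdr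
      have hdrop : rest.drop tw.length = dr := by
        conv_lhs => rw [hsplit]
        exact List.drop_left
      have hdrlen : dr.length ≤ n := by
        have : tw.length + dr.length = rest.length := by
          conv_rhs => rw [hsplit]; simp
        simp only [List.length_cons] at hl
        omega
      rw [pvRuns, hdrop]
      rw [List.map_cons, List.foldl_cons, List.foldl_cons]
      rw [ih dr hdrlen _ (PySem.Set.add s c0)]
      conv_rhs => rw [hsplit]
      rw [List.foldl_append]
      congr 1
      refine (set_update_contained tw (PySem.Set.add s c0) ?_).symm
      intro x hx
      have : x = c0 := by simpa using List.mem_takeWhile_imp hx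
      subst this
      have hmem : x ∈ PySem.Set.add s x := (PySem.Set.mem_add s x x).2 (Or.inr rfl)
      rw [PySem.Set.contains_eq_decide, decide_eq_true_iff]
      exact hmem

theorem set_heads (l : List Char) :
    PySem.Set.ofList ((pvRuns l 0).map (·.1)) = PySem.Set.ofList l := by
  rw [PySem.Set.ofList_eq_foldl, PySem.Set.ofList_eq_foldl]
  exact set_heads_aux l.length l (le_refl _) 0 PySem.Set.empty

theorem foldl_skip_dash (key : Char → String) (v : Char → List (Int × Int)) :
    ∀ (l : List Char) (d : PySem.Dict String (List (Int × Int))),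
    l.foldl (fun res c => if c = '-' then res else res.insert (key c) (v c)) d
      = (l.filter (fun c => !decide (c = '-'))).foldl (fun res c => res.insert (key c) (v c)) d := by
  intro l
  induction l with
  | nil => intro d; simp
  | cons a l ih =>
    intro d
    by_cases ha : a = '-'
    · subst ha
      rw [List.foldl_cons, if_pos rfl, List.filter_cons_of_neg (by simp)]
      exact ih d
    · rw [List.foldl_cons, if_neg ha, List.filter_cons_of_pos (by simpa using ha),
        List.foldl_cons]
      exact ih _

theorem filterMap_dash (g : Char × Int × Int → String × (Int × Int)) :
    ∀ (l : List (Char × Int × Int)),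
    l.filterMap (fun r => if r.1 = '-' then none else some (g r))
      = (l.filter (fun r => !decide (r.1 = '-'))).map g := by
  intro l
  induction l with
  | nil => simp
  | cons a l ih =>
    by_cases ha : a.1 = '-'
    · rw [List.filterMap_cons, if_pos ha, List.filter_cons_of_neg (by simpa using ha), ih]
    · rw [List.filterMap_cons, if_neg ha, List.filter_cons_of_pos (by simpa using ha),
        List.map_cons, ih]

theorem filterMap_char (c : Char) :
    ∀ (l : List (Char × Int × Int)),
    l.filterMap (fun r => if r.1 = c then some r.2 else none)
      = (l.filter (fun r => decide (r.1 = c))).map (·.2) := by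
  intro l
  induction l with
  | nil => simp
  | cons a l ih =>
    by_cases ha : a.1 = c
    · rw [List.filterMap_cons, if_pos ha, List.filter_cons_of_pos (by simpa using ha),
        List.map_cons, ih]
    · rw [List.filterMap_cons, if_neg ha, List.filter_cons_of_neg (by simpa using ha), ih]

theorem key_inj : Function.Injective (fun c : Char => String.ofList [c]) := by
  intro a b h
  have := congrArg String.toList h
  simpa using this

theorem find_eq_alt (src : String) : find_all_substrings src = find_all_substrings_alt src := by
  unfold find_all_substrings find_all_substrings_alt
  rw [foldl_skip_dash (fun c => String.ofList [c]) (fun c => pvInnerA src.toList c)]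
  rw [PySem.Dict.items_foldl_insert_fresh _ (fun c => String.ofList [c])
    (fun c => pvInnerA src.toList c) PySem.Dict.empty
    (by intro a _; simp)
    (by
      refine List.Nodup.map key_inj ?_
      exact (PySem.Set.nodup_ofList src.toList).filter _)]
  rw [filterMap_dash (fun r => (String.ofList [r.1], r.2)) (pvRuns src.toList 0)]
  -- B-side dict facts
  have hkeys : ((((pvRuns src.toList 0).filter (fun r => !decide (r.1 = '-'))).map
        (fun r => (String.ofList [r.1], r.2))).foldl
        (fun d p => d.modify p.1 [] (· ++ [p.2])) PySem.Dict.empty).keys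
      = ((PySem.Set.ofList src.toList).filter (fun c => !decide (c = '-'))).map
          (fun c => String.ofList [c]) := by
    rw [PySem.Dict.keys_foldl_modify_key]
    rw [List.map_map]
    have h1 : ((fun p : String × (Int × Int) => p.1) ∘ (fun r : Char × Int × Int => (String.ofList [r.1], r.2)))
        = (fun c : Char => String.ofList [c]) ∘ (fun r : Char × Int × Int => r.1) := rfl
    rw [h1, ← List.map_map]
    have h2 : ((pvRuns src.toList 0).filter (fun r => !decide (r.1 = '-'))).map (fun r => r.1)
        = ((pvRuns src.toList 0).map (fun r => r.1)).filter (fun c => !decide (c = '-')) := by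
      rw [List.filter_map]
      rfl
    rw [h2]
    rw [show (PySem.Dict.empty : PySem.Dict String (List (Int × Int))).keys
        = ([] : PySem.Set String) from rfl]
    rw [show ∀ xs : List String, PySem.Set.update ([] : PySem.Set String) xs
        = PySem.Set.ofList xs from fun xs => rfl]
    rw [set_ofList_map _ key_inj, set_ofList_filter, set_heads]
  have hnodup : ((((pvRuns src.toList 0).filter (fun r => !decide (r.1 = '-'))).map
        (fun r => (String.ofList [r.1], r.2))).foldl
        (fun d p => d.modify p.1 [] (· ++ [p.2])) PySem.Dict.empty).keys.Nodup := by
    rw [hkeys]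
    refine List.Nodup.map key_inj ?_
    exact (PySem.Set.nodup_ofList src.toList).filter _
  rw [PySem.Dict.items_eq_map_keys _ hnodup []]
  rw [hkeys, List.map_map]
  rw [show (PySem.Dict.empty : PySem.Dict String (List (Int × Int))).items = [] from rfl,
    List.nil_append]
  apply List.map_congr_left
  intro c hc
  have hcne : c ≠ '-' := by
    have := (List.mem_filter.1 hc).2
    simpa using this
  simp only [Function.comp_apply]
  refine Prod.ext rfl ?_
  show pvInnerA src.toList c
    = ((((pvRuns src.toList 0).filter (fun r => !decide (r.1 = '-'))).map
        (fun r => (String.ofList [r.1], r.2))).foldl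
        (fun d p => d.modify p.1 [] (· ++ [p.2])) PySem.Dict.empty).getD (String.ofList [c]) []
  rw [PySem.Dict.getD_foldl_modify_append]
  rw [PySem.Dict.getD_empty, List.nil_append]
  rw [List.filter_map]
  have hq : ((fun p : String × (Int × Int) => p.1 == String.ofList [c])
        ∘ (fun r : Char × Int × Int => (String.ofList [r.1], r.2)))
      = fun r : Char × Int × Int => decide (r.1 = c) := by
    funext r
    simp only [Function.comp_apply]
    rw [show (String.ofList [r.1] == String.ofList [c]) = decide (String.ofList [r.1] = String.ofList [c])
      from Bool.coe_iff_coe.1 (by simp)]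
    rw [decide_eq_decide]
    exact ⟨fun h => key_inj h, fun h => by rw [h]⟩
  rw [hq, List.filter_filter]
  have hpp : (fun r : Char × Int × Int => decide (r.1 = c) && !decide (r.1 = '-'))
      = fun r : Char × Int × Int => decide (r.1 = c) := by
    funext r
    by_cases hr : r.1 = c
    · simp [hr, hcne]
    · simp [hr]
  rw [hpp, List.map_map]
  have hmap : ((fun p : String × (Int × Int) => p.2)
        ∘ (fun r : Char × Int × Int => (String.ofList [r.1], r.2)))
      = fun r : Char × Int × Int => r.2 := rfl
  rw [hmap]
  rw [show ((pvRuns src.toList 0).filter (fun r => decide (r.1 = c))).map (fun r => r.2)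
      = (pvRuns src.toList 0).filterMap (fun r => if r.1 = c then some r.2 else none) from
    (filterMap_char c (pvRuns src.toList 0)).symm]
  rw [runs_filter_eq_blocks, innerA_eq_blocks]

-- ===== VERDICT (by name: the statement is the Claim_ definition above) =====
theorem find_all_substrings_spec : Claim_equal_find_all_substrings := by
  intro src_str _
  unfold Spec_find_all_substrings
  exact find_eq_alt src_str
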